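-- pv_equiv track=rewrite | github.com/NodeJSmith/aoc | aoc/day14/puzzle1.py | adjust_piece
-- ===== SOURCE A (Python) =====
-- from typing import Literal
--
-- def adjust_piece(line, direction: Literal["left", "right"]):
--     if "O" not in line:
--         return line
--
--     if "#" not in line:
--         period_count = len([char for char in line if char == "."])
--         o_count = len([char for char in line if char == "O"])
--         if direction == "left":
--             new_line = ["O"] * o_count + ["."] * period_count
--         else:
--             new_line = ["."] * period_count + ["O"] * o_count
--
--         return new_line
--
--     hash_index = "".join(line).find("#")
--     hash_index = hash_index + 1 if hash_index == 0 else hash_index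
--     part_1 = line[:hash_index]
--     part_2 = line[hash_index:]
--
--     piece1 = adjust_piece(part_1, direction)
--     piece2 = adjust_piece(part_2, direction)
--     return piece1 + piece2
-- ===== SOURCE B (Python) =====
-- def _emit(o, n, direction):
--     if direction == "left":
--         return ["O"] * o + ["."] * (n - o)
--     return ["."] * (n - o) + ["O"] * o
--
--
-- def adjust_piece(line, direction):
--     # no rocks: nothing can move
--     if "O" not in line:
--         return line
--     # single pass: count rocks per '#'-delimited segment and emit each segment once
--     out = []
--     o = 0
--     n = 0
--     for ch in line:
--         if ch == "#":
--             out += _emit(o, n, direction)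
--             out.append("#")
--             o = 0
--             n = 0
--         else:
--             if ch == "O":
--                 o += 1
--             n += 1
--     out += _emit(o, n, direction)
--     return out
-- ===== Notes on version B (the rewrite author's own statement) =====
-- stated objective: alternative
-- what changed: A recursively re-joins the whole remaining list and re-scans it with find('#') at every split; B makes one left-to-right pass keeping per-segment rock/length counters and emits each '#'-delimited segment once (both keep A's 'no rock, return unchanged' early-out).
-- outside the precondition, e.g. on adjust_piece(['O', 'a'], 'left'): A returns ['O'], B returns ['O', '.']; on adjust_piece(['OO', 'O'], 'left'): A returns ['O'], B returns ['O', '.']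
import Mathlib
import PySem

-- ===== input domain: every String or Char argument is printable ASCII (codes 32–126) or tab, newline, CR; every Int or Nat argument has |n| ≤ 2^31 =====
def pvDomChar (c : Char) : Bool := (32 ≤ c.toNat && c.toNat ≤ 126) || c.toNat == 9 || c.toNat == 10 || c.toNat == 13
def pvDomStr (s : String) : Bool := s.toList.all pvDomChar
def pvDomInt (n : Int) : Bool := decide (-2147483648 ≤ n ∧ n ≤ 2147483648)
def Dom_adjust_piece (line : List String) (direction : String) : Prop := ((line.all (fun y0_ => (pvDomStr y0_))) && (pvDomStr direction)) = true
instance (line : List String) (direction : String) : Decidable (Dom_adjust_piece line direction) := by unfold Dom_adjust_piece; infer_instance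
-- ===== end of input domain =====

-- B replaces A's recursive join/find splitting by a single counting pass over the '#'-delimited segments.


-- ===== PORT A =====
-- fuel-bounded transliteration of A's recursion (the fuel only makes the recursion total;
-- under Pre_adjust_piece the fuel `line.length + 1` is never exhausted — proved below)
def pvAdjFuel : Nat → List String → String → List String
  | 0, line, _ => line
  | fuel + 1, line, direction =>
    if "O" ∉ line then line
    else if "#" ∉ line then
      let period_count := (line.filter (fun ch => ch == ".")).length
      let o_count := (line.filter (fun ch => ch == "O")).length
      if direction = "left" then List.replicate o_count "O" ++ List.replicate period_count "."
      else List.replicate period_count "." ++ List.replicate o_count "O"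
    else
      let hash_index : Int := PySem.Str.find (PySem.Str.join "" line) "#"
      let hash_index : Int := if hash_index = 0 then hash_index + 1 else hash_index
      let part_1 := PySem.List.slice line none (some hash_index)
      let part_2 := PySem.List.slice line (some hash_index) none
      pvAdjFuel fuel part_1 direction ++ pvAdjFuel fuel part_2 direction

def adjust_piece (line : List String) (direction : String) : List String :=
  pvAdjFuel (line.length + 1) line direction

-- ===== PORT B =====
def pvEmit (o n : Nat) (direction : String) : List String :=
  if direction = "left" then List.replicate o "O" ++ List.replicate (n - o) "."
  else List.replicate (n - o) "." ++ List.replicate o "O"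

def adjust_piece_alt (line : List String) (direction : String) : List String :=
  if "O" ∉ line then line
  else
  let st := line.foldl (fun (acc : List String × Nat × Nat) ch =>
      if ch = "#" then (acc.1 ++ pvEmit acc.2.1 acc.2.2 direction ++ ["#"], 0, 0)
      else (acc.1, (if ch = "O" then acc.2.1 + 1 else acc.2.1), acc.2.2 + 1)) ([], 0, 0)
  st.1 ++ pvEmit st.2.1 st.2.2 direction

-- ===== PRECONDITION & SPEC =====
-- Pre_ excludes only lines that contain a rock cell "O" together with cells outside the puzzle
-- alphabet {"O", ".", "#"}: there A's element-membership tests and char-index slicing of the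
-- joined string drop or duplicate cells by accident of the implementation (and A can even
-- recurse forever, e.g. on ["aaaa", "#", "O"]); lines without an "O" cell are returned unchanged
-- by both programs and stay inside Pre_.
def Pre_adjust_piece (line : List String) (direction : String) : Prop :=
  "O" ∉ line ∨ ∀ s ∈ line, s = "O" ∨ s = "." ∨ s = "#"
instance (line : List String) (direction : String) : Decidable (Pre_adjust_piece line direction) := by
  unfold Pre_adjust_piece; infer_instance

def pvWitness_adjust_piece : List String × String := (["O", ".", "#", ".", "O"], "left")

def Spec_adjust_piece (line : List String) (direction : String) (out : List String) : Prop := out = adjust_piece_alt line direction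
instance (line : List String) (direction : String) (out : List String) : Decidable (Spec_adjust_piece line direction out) := by unfold Spec_adjust_piece; infer_instance

-- ===== CLAIM (what is proved, stated in full; the proofs are below) =====
def Claim_equal_adjust_piece : Prop := ∀ (line : List String) (direction : String), Dom_adjust_piece line direction → Pre_adjust_piece line direction → Spec_adjust_piece line direction (adjust_piece line direction)

-- ===== LEMMAS AND PROOFS =====

-- recursive form of B's single pass (proof helper)
def pvBGo (direction : String) : List String → Nat → Nat → List String
  | [], o, n => pvEmit o n direction
  | ch :: rest, o, n =>
      if ch = "#" then pvEmit o n direction ++ "#" :: pvBGo direction rest 0 0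
      else pvBGo direction rest (if ch = "O" then o + 1 else o) (n + 1)

theorem pvFold_eq (direction : String) (l : List String) : ∀ (acc : List String) (o n : Nat),
    (l.foldl (fun (acc : List String × Nat × Nat) ch =>
        if ch = "#" then (acc.1 ++ pvEmit acc.2.1 acc.2.2 direction ++ ["#"], 0, 0)
        else (acc.1, (if ch = "O" then acc.2.1 + 1 else acc.2.1), acc.2.2 + 1)) (acc, o, n)).1
      ++ pvEmit (l.foldl (fun (acc : List String × Nat × Nat) ch =>
        if ch = "#" then (acc.1 ++ pvEmit acc.2.1 acc.2.2 direction ++ ["#"], 0, 0)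
        else (acc.1, (if ch = "O" then acc.2.1 + 1 else acc.2.1), acc.2.2 + 1)) (acc, o, n)).2.1
        ((l.foldl (fun (acc : List String × Nat × Nat) ch =>
        if ch = "#" then (acc.1 ++ pvEmit acc.2.1 acc.2.2 direction ++ ["#"], 0, 0)
        else (acc.1, (if ch = "O" then acc.2.1 + 1 else acc.2.1), acc.2.2 + 1)) (acc, o, n)).2.2) direction
      = acc ++ pvBGo direction l o n := by
  induction l with
  | nil => intro acc o n; simp [pvBGo]
  | cons ch rest ih =>
    intro acc o n
    by_cases h : ch = "#"
    · simp only [List.foldl_cons, h, pvBGo]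
      rw [ih]
      simp
    · simp only [List.foldl_cons, if_neg h, pvBGo]
      rw [ih]

theorem pvAlt_eq_go (line : List String) (direction : String) (hO : "O" ∈ line) :
    adjust_piece_alt line direction = pvBGo direction line 0 0 := by
  unfold adjust_piece_alt
  rw [if_neg (not_not_intro hO)]
  simpa using pvFold_eq direction line [] 0 0

theorem pvEmit_zero (n : Nat) (d : String) : pvEmit 0 n d = List.replicate n "." := by
  unfold pvEmit; split <;> simp

theorem pvBGo_noO (d : String) : ∀ (l : List String) (n : Nat),
    (∀ s ∈ l, s = "." ∨ s = "#") → pvBGo d l 0 n = List.replicate n "." ++ l := by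
  intro l
  induction l with
  | nil => intro n _; simp [pvBGo, pvEmit_zero]
  | cons ch rest ih =>
    intro n h
    rcases h ch (by simp) with hc | hc <;> subst hc
    · have := ih (n + 1) (fun s hs => h s (by simp [hs]))
      simp [pvBGo, this, List.replicate_succ']
    · have := ih 0 (fun s hs => h s (by simp [hs]))
      simp [pvBGo, pvEmit_zero, this]

theorem pvBGo_noHash (d : String) : ∀ (l : List String) (o n : Nat), "#" ∉ l →
    pvBGo d l o n = pvEmit (o + (l.filter (fun ch => ch == "O")).length) (n + l.length) d := by
  intro l
  induction l with
  | nil => intro o n _; simp [pvBGo]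
  | cons ch rest ih =>
    intro o n h
    have hch : ch ≠ "#" := fun he => h (by simp [he])
    have hrest : "#" ∉ rest := fun hm => h (by simp [hm])
    by_cases ho : ch = "O"
    · have h1 : (ch :: rest).filter (fun c => c == "O") = ch :: rest.filter (fun c => c == "O") := by
        simp [ho]
      simp only [pvBGo, if_neg hch, if_pos ho, ih _ _ hrest, h1]
      congr 1
      · simp only [List.length_cons]; omega
      · simp only [List.length_cons]; omega
    · have h1 : (ch :: rest).filter (fun c => c == "O") = rest.filter (fun c => c == "O") := by
        simp [ho]
      simp only [pvBGo, if_neg hch, if_neg ho, ih _ _ hrest, h1]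
      congr 1
      simp only [List.length_cons]; omega

theorem pvBGo_split (d : String) : ∀ (l1 r : List String) (o n : Nat), "#" ∉ l1 →
    pvBGo d (l1 ++ "#" :: r) o n = pvBGo d l1 o n ++ "#" :: pvBGo d r 0 0 := by
  intro l1
  induction l1 with
  | nil => intro r o n _; simp [pvBGo]
  | cons ch rest ih =>
    intro r o n h
    have hch : ch ≠ "#" := fun he => h (by simp [he])
    have hrest : "#" ∉ rest := fun hm => h (by simp [hm])
    simp only [List.cons_append, pvBGo, if_neg hch, ih _ _ _ hrest]

-- the single character of each cell, under Pre_
def pvChOf (s : String) : Char := if s = "O" then 'O' else if s = "." then '.' else '#'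

theorem pvJoin_toList (line : List String) (h : ∀ s ∈ line, s = "O" ∨ s = "." ∨ s = "#") :
    (PySem.Str.join "" line).toList = line.map pvChOf := by
  have h1 : (PySem.Str.join "" line).toList = PySem.Chars.join [] (line.map String.toList) := by
    simp [PySem.Str.toList_join]
  have h2 : line.map String.toList = (line.map pvChOf).map (fun c => [c]) := by
    induction line with
    | nil => simp
    | cons s rest ih =>
      have := ih (fun t ht => h t (by simp [ht]))
      rcases h s (by simp) with hc | hc | hc <;> subst hc <;> simp [pvChOf, this]
  rw [h1, h2, PySem.Chars.join_nil_singletons]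

theorem pvSingleton_prefix (t : List Char) (a : Char) : [a] <+: t ↔ t.head? = some a := by
  constructor
  · rintro ⟨s, rfl⟩; simp
  · intro h
    cases t with
    | nil => simp at h
    | cons x xs => simp at h; exact ⟨xs, by simp [h]⟩

theorem pvFind_hash (xs : List String) (hpre : ∀ s ∈ xs, s = "O" ∨ s = "." ∨ s = "#")
    (hmem : "#" ∈ xs) :
    PySem.Str.find (PySem.Str.join "" xs) "#" = ((xs.idxOf "#" : Nat) : Int) := by
  have hcs : (PySem.Str.join "" xs).toList = xs.map pvChOf := pvJoin_toList xs hpre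
  have hfind : PySem.Str.find (PySem.Str.join "" xs) "#"
      = PySem.Chars.find (xs.map pvChOf) ['#'] := by
    rw [PySem.Str.find_eq, hcs]; rfl
  have hch_iff : ∀ (j : Nat) (hj : j < xs.length), pvChOf (xs[j]) = '#' ↔ xs[j] = "#" := by
    intro j hj
    rcases hpre (xs[j]) (by simp) with hc | hc | hc <;> rw [hc] <;> simp [pvChOf]
  have hklen : xs.idxOf "#" < xs.length := List.idxOf_lt_length_of_mem hmem
  have hlinek : xs[xs.idxOf "#"] = "#" := List.getElem_idxOf hklen
  have hinfix : ['#'] <:+: xs.map pvChOf :=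
    (List.singleton_infix_iff _ _).mpr (List.mem_map.mpr ⟨"#", hmem, by simp [pvChOf]⟩)
  have hnn : 0 ≤ PySem.Chars.find (xs.map pvChOf) ['#'] :=
    (PySem.Chars.find_nonneg_iff _ _).mpr hinfix
  obtain ⟨hpre1, hmin⟩ := PySem.Chars.find_spec hnn
  set F : Nat := (PySem.Chars.find (xs.map pvChOf) ['#']).toNat with hF
  -- the char at F is '#'
  have hgetF : (xs.map pvChOf)[F]? = some '#' := by
    rw [← List.head?_drop]
    exact (pvSingleton_prefix _ _).mp hpre1
  have hFlen : F < xs.length := by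
    by_contra hge
    rw [List.getElem?_eq_none (by simpa using Nat.le_of_not_lt hge)] at hgetF
    simp at hgetF
  have hlineF : xs[F] = "#" := by
    have : pvChOf (xs[F]) = '#' := by
      have := hgetF
      rw [List.getElem?_eq_getElem (by simpa using hFlen)] at this
      simpa using this
    exact (hch_iff F hFlen).mp this
  -- idxOf ≤ F
  have hle1 : xs.idxOf "#" ≤ F := by
    have hmt : "#" ∈ xs.take (F + 1) := by
      have : (xs.take (F + 1))[F]'(by simp; omega) = xs[F] := List.getElem_take
      rw [← hlineF, ← this]
      exact List.getElem_mem _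
    have := (List.mem_take_iff_idxOf_lt hmem).mp hmt
    omega
  -- F ≤ idxOf
  have hle2 : F ≤ xs.idxOf "#" := by
    by_contra hgt
    apply hmin (xs.idxOf "#") (by omega)
    rw [pvSingleton_prefix, List.head?_drop, List.getElem?_eq_getElem (by simpa using hklen)]
    simp [hlinek, pvChOf]
  have : F = xs.idxOf "#" := Nat.le_antisymm hle2 hle1
  rw [hfind, ← this, hF, Int.toNat_of_nonneg hnn]

theorem pvCount (l : List String) (h : ∀ s ∈ l, s = "O" ∨ s = ".") :
    (l.filter (fun ch => ch == ".")).length + (l.filter (fun ch => ch == "O")).length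
      = l.length := by
  induction l with
  | nil => simp
  | cons s rest ih =>
    have hr := ih (fun t ht => h t (List.mem_cons_of_mem _ ht))
    rcases h s (by simp) with hc | hc <;> subst hc <;> simp <;> omega

-- A agrees with B's pass on '#'-free lines (any positive fuel)
theorem pvNoHash_case (fuel : Nat) (l : List String) (d : String)
    (hpre : ∀ s ∈ l, s = "O" ∨ s = "." ∨ s = "#") (hh : "#" ∉ l) :
    pvAdjFuel (fuel + 1) l d = pvBGo d l 0 0 := by
  by_cases hO : "O" ∈ l
  · have hOP : ∀ s ∈ l, s = "O" ∨ s = "." := by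
      intro s hs
      rcases hpre s hs with h | h | h
      · exact Or.inl h
      · exact Or.inr h
      · exact absurd (h ▸ hs) hh
    have hcnt := pvCount l hOP
    rw [pvBGo_noHash d l 0 0 hh]
    have hpc : (l.filter (fun ch => ch == ".")).length
        = l.length - (l.filter (fun ch => ch == "O")).length := by omega
    simp only [pvAdjFuel, if_neg (not_not_intro hO), if_pos hh]
    unfold pvEmit
    rw [hpc]
    simp
  · have hdh : ∀ s ∈ l, s = "." ∨ s = "#" := by
      intro s hs
      rcases hpre s hs with h | h | h
      · exact absurd (h ▸ hs) hO
      · exact Or.inl h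
      · exact Or.inr h
    rw [pvBGo_noO d l 0 hdh]
    simp only [pvAdjFuel, if_pos hO, List.replicate_zero, List.nil_append]

theorem pvMain (d : String) : ∀ (fuel : Nat) (xs : List String),
    (∀ s ∈ xs, s = "O" ∨ s = "." ∨ s = "#") → xs.length < fuel →
    pvAdjFuel fuel xs d = pvBGo d xs 0 0 := by
  intro fuel
  induction fuel with
  | zero => intro xs _ h; omega
  | succ f ih =>
    intro xs hpre hlen
    by_cases hh : "#" ∈ xs
    · by_cases hO : "O" ∈ xs
      · -- recursive case: A splits at the first '#'
        have hklen : List.idxOf "#" xs < xs.length := List.idxOf_lt_length_of_mem hh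
        have hlinek : xs[List.idxOf "#" xs] = "#" := List.getElem_idxOf hklen
        have hfind := pvFind_hash xs hpre hh
        have hlen1 : 1 ≤ xs.length := by omega
        cases f with
        | zero => omega
        | succ f' =>
          rw [pvAdjFuel, if_neg (not_not_intro hO), if_neg (not_not_intro hh)]
          simp only [hfind]
          by_cases hk0 : List.idxOf "#" xs = 0
          · have harg : (if ((List.idxOf "#" xs : Nat) : Int) = 0
                then ((List.idxOf "#" xs : Nat) : Int) + 1
                else ((List.idxOf "#" xs : Nat) : Int)) = 1 := by
              rw [if_pos (by rw [hk0]; norm_num), hk0]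
              norm_num
            rw [harg]
            have hline0 : xs[0] = "#" := by
              simp only [hk0] at hlinek; exact hlinek
            have h0 : xs.drop 0 = "#" :: xs.drop 1 := by
              rw [List.drop_eq_getElem_cons (by omega)]
              rw [List.drop_one]
              exact congrArg (· :: xs.tail) hline0
            have hline : xs = "#" :: xs.drop 1 := by simpa using h0
            have hsl1 : PySem.List.slice xs none (some 1) = ["#"] := by
              rw [PySem.List.slice_to xs (by norm_num)]
              conv_lhs => rw [hline]
              rfl
            have hsl2 : PySem.List.slice xs (some 1) none = xs.drop 1 := by
              rw [PySem.List.slice_from xs (by norm_num)]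
              norm_num
            rw [hsl1, hsl2]
            have hA1 : pvAdjFuel (f' + 1) ["#"] d = ["#"] := by
              simp [pvAdjFuel]
            have hA2 : pvAdjFuel (f' + 1) (xs.drop 1) d = pvBGo d (xs.drop 1) 0 0 :=
              ih _ (fun s hs => hpre s (List.mem_of_mem_drop hs))
                (by simp only [List.length_drop]; omega)
            rw [hA1, hA2]
            conv_rhs => rw [hline]
            simp [pvBGo, pvEmit_zero]
          · have hcast : ((List.idxOf "#" xs : Nat) : Int) ≠ 0 := by
              simpa using hk0
            rw [if_neg hcast]
            rw [PySem.List.slice_to_natCast xs, PySem.List.slice_from_natCast xs]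
            have htnh : "#" ∉ xs.take (List.idxOf "#" xs) := by
              intro hm
              have := (List.mem_take_iff_idxOf_lt hh).mp hm
              omega
            have hA1 : pvAdjFuel (f' + 1) (xs.take (List.idxOf "#" xs)) d
                = pvBGo d (xs.take (List.idxOf "#" xs)) 0 0 :=
              pvNoHash_case f' _ d (fun s hs => hpre s (List.mem_of_mem_take hs)) htnh
            have hA2 : pvAdjFuel (f' + 1) (xs.drop (List.idxOf "#" xs)) d
                = pvBGo d (xs.drop (List.idxOf "#" xs)) 0 0 :=
              ih _ (fun s hs => hpre s (List.mem_of_mem_drop hs))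
                (by simp only [List.length_drop]; omega)
            have hdropk : xs.drop (List.idxOf "#" xs)
                = "#" :: xs.drop (List.idxOf "#" xs + 1) := by
              rw [List.drop_eq_getElem_cons hklen]
              simp [hlinek]
            rw [hA1, hA2, hdropk]
            conv_rhs => rw [← List.take_append_drop (List.idxOf "#" xs) xs, hdropk]
            rw [pvBGo_split d _ _ 0 0 htnh]
            simp [pvBGo, pvEmit_zero]
      · have hdh : ∀ s ∈ xs, s = "." ∨ s = "#" := by
          intro s hs
          rcases hpre s hs with h | h | h
          · exact absurd (h ▸ hs) hO
          · exact Or.inl h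
          · exact Or.inr h
        rw [pvBGo_noO d xs 0 hdh]
        simp only [pvAdjFuel, if_pos hO, List.replicate_zero, List.nil_append]
    · exact pvNoHash_case f xs d hpre hh

-- ===== VERDICT (by name: the statement is the Claim_ definition above) =====
theorem adjust_piece_spec : Claim_equal_adjust_piece := by
  intro line direction _ hpre
  unfold Spec_adjust_piece adjust_piece
  by_cases hO : "O" ∈ line
  · rcases hpre with hpre | hpre
    · exact absurd hO hpre
    · rw [pvAlt_eq_go line direction hO]
      exact pvMain direction (line.length + 1) line hpre (by omega)
  · unfold adjust_piece_alt
    rw [if_pos hO, pvAdjFuel, if_pos hO]
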